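-- pv_equiv track=rewrite | github.com/coobin/xrxs2ldap | src/xrxs2ldap/nextcloud_sync.py | _index_groups_by_display_name
-- ===== SOURCE A (Python) =====
-- from collections import defaultdict
--
-- def _index_groups_by_display_name(
--
--     groups: dict[str, str],
--     department_names: set[str],
-- ) -> tuple[dict[str, str], dict[str, list[str]]]:
--     gids_by_display_name: dict[str, list[str]] = defaultdict(list)
--     for gid, display_name in groups.items():
--         if display_name in department_names:
--             gids_by_display_name[display_name].append(gid)
--
--     unique = {
--         display_name: gids[0]
--         for display_name, gids in gids_by_display_name.items()
--         if len(gids) == 1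
--     }
--     duplicates = {
--         display_name: gids
--         for display_name, gids in gids_by_display_name.items()
--         if len(gids) > 1
--     }
--     return unique, duplicates
-- ===== SOURCE B (Python) =====
-- from collections import Counter
--
-- def _index_groups_by_display_name(groups, department_names):
--     counts = Counter(
--         display_name
--         for display_name in groups.values()
--         if display_name in department_names
--     )
--     unique = {}
--     duplicates = {}
--     for gid, display_name in groups.items():
--         count = counts.get(display_name)
--         if count is None:
--             continue
--         if count == 1:
--             unique[display_name] = gid
--         else:
--             duplicates[display_name] = duplicates.get(display_name, []) + [gid]
--     return unique, duplicates
-- ===== Notes on version B (the rewrite author's own statement) =====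
-- stated objective: alternative
-- what changed: Replaces the defaultdict index built then split by two comprehensions with a Counter of filtered display names plus a single second pass that routes each gid directly into the unique or duplicates dict.
import Mathlib
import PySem

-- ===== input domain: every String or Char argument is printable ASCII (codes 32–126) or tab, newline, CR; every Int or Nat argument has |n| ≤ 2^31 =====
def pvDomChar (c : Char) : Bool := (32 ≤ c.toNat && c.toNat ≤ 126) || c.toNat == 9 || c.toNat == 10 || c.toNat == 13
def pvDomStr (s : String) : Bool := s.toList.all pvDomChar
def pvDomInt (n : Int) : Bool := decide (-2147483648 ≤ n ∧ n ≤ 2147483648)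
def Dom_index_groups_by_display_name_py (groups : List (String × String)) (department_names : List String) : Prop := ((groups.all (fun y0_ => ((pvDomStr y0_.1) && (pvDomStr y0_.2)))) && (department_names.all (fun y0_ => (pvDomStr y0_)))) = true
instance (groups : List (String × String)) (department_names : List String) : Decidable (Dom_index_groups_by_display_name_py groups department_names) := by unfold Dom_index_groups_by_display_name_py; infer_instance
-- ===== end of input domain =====

-- B replaces the index-then-split (defaultdict + two comprehensions) with a Counter and one
-- direct distributing pass; same O(n) cost, genuinely different decomposition (objective: alternative).

-- ===== PORT A =====
def index_groups_by_display_name_py (groups : List (String × String)) (department_names : List String) : (List (String × String)) × (List (String × List String)) :=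
  -- for gid, display_name in groups.items(): if display_name in department_names: gids_by_display_name[display_name].append(gid)
  let gidsByName : PySem.Dict String (List String) :=
    groups.foldl (fun d p => if p.2 ∈ department_names then d.modify p.2 [] (· ++ [p.1]) else d)
      PySem.Dict.empty
  -- unique = {name: gids[0] for ... if len(gids) == 1}   (gids[0] = headI, exact: guarded by length == 1)
  let unique : PySem.Dict String String :=
    gidsByName.items.foldl (fun u r => if r.2.length == 1 then u.insert r.1 r.2.headI else u)
      PySem.Dict.empty
  -- duplicates = {name: gids for ... if len(gids) > 1}
  let duplicates : PySem.Dict String (List String) :=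
    gidsByName.items.foldl (fun d r => if 1 < r.2.length then d.insert r.1 r.2 else d)
      PySem.Dict.empty
  (unique.items, duplicates.items)

-- ===== PORT B =====
def index_groups_by_display_name_py_alt (groups : List (String × String)) (department_names : List String) : (List (String × String)) × (List (String × List String)) :=
  -- counts = Counter(name for name in groups.values() if name in department_names)
  let counts : PySem.Dict String Int :=
    PySem.Dict.counter ((groups.map (·.2)).filter (fun n => decide (n ∈ department_names)))
  -- one pass: route each gid into unique or duplicates according to its name's count
  let st :=
    groups.foldl (fun st p =>
      match counts.get? p.2 with
      | none => st
      | some c =>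
          if c == 1 then (st.1.insert p.2 p.1, st.2)
          else (st.1, st.2.insert p.2 (st.2.getD p.2 [] ++ [p.1])))
      ((PySem.Dict.empty : PySem.Dict String String), (PySem.Dict.empty : PySem.Dict String (List String)))
  (st.1.items, st.2.items)

-- ===== PRECONDITION & SPEC =====
def Spec_index_groups_by_display_name_py (groups : List (String × String)) (department_names : List String) (out : (List (String × String)) × (List (String × List String))) : Prop := out = index_groups_by_display_name_py_alt groups department_names
instance (groups : List (String × String)) (department_names : List String) (out : (List (String × String)) × (List (String × List String))) : Decidable (Spec_index_groups_by_display_name_py groups department_names out) := by unfold Spec_index_groups_by_display_name_py; infer_instance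

-- ===== CLAIM (what is proved, stated in full; the proofs are below) =====
def Claim_equal_index_groups_by_display_name_py : Prop := ∀ (groups : List (String × String)) (department_names : List String), Dom_index_groups_by_display_name_py groups department_names → Spec_index_groups_by_display_name_py groups department_names (index_groups_by_display_name_py groups department_names)


-- ===== LEMMAS AND PROOFS =====

-- the filtered group list with (display_name, gid) pairs, the common spine of both ports
def pvSw (groups : List (String × String)) (department_names : List String) : List (String × String) :=
  (groups.filter (fun p => decide (p.2 ∈ department_names))).map (fun p => (p.2, p.1))

-- the gids carried by one display name, in order
def pvG (F : List (String × String)) (n : String) : List String :=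
  (F.filter (fun r => r.1 == n)).map (fun r => r.2)

-- canonical form both ports are reduced to
def pvCanon (F : List (String × String)) : (List (String × String)) × (List (String × List String)) :=
  ( ((PySem.Set.ofList (F.map Prod.fst)).filter (fun n => (F.map Prod.fst).count n == 1)).map
      (fun n => (n, (pvG F n).headI)),
    ((PySem.Set.ofList (F.map Prod.fst)).filter (fun n => decide (1 < (F.map Prod.fst).count n))).map
      (fun n => (n, pvG F n)) )

lemma pv_count_map_fst (F : List (String × String)) (a : String) :
    (F.map Prod.fst).count a = F.countP (fun r => r.1 == a) := by
  simp [List.count_eq_countP, List.countP_map]; rfl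

lemma pv_length_g (F : List (String × String)) (n : String) :
    (pvG F n).length = (F.map Prod.fst).count n := by
  simp [pvG, pv_count_map_fst, List.countP_eq_length_filter]

lemma pv_counter_get? (l : List String) (v : String) :
    (PySem.Dict.counter l).get? v = if v ∈ l then some ((l.count v : Int)) else none := by
  by_cases h : v ∈ l
  · cases hg : (PySem.Dict.counter l).get? v with
    | none =>
        exfalso
        have hc := (PySem.Dict.get?_eq_none_iff_contains _ _).mp hg
        rw [PySem.Dict.contains_counter] at hc
        simp_all
    | some c =>
        have : (PySem.Dict.counter l).getD v 0 = c := by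
          rw [PySem.Dict.getD_eq_get?_getD, hg]; rfl
        rw [PySem.Dict.getD_counter] at this
        simp [h, this]
  · simp only [if_neg h]
    rw [PySem.Dict.get?_eq_none_iff_contains, PySem.Dict.contains_counter]
    simp [h]

lemma pv_ofList_filter (p : String → Bool) (xs : List String) :
    PySem.Set.ofList (xs.filter p) = (PySem.Set.ofList xs).filter p := by
  induction xs with
  | nil => rfl
  | cons x xs ih =>
      by_cases hx : p x
      · rw [List.filter_cons_of_pos hx, PySem.Set.ofList_cons, PySem.Set.ofList_cons,
            List.filter_cons_of_pos hx, ih]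
        show _ = x :: List.filter p (List.filter (fun y => !(y == x)) (PySem.Set.ofList xs))
        show x :: List.filter (fun y => !(y == x)) (List.filter p (PySem.Set.ofList xs)) = _
        rw [List.filter_filter, List.filter_filter]
        simp [Bool.and_comm]
      · rw [List.filter_cons_of_neg hx, PySem.Set.ofList_cons, List.filter_cons_of_neg hx, ih]
        show _ = List.filter p (List.filter (fun y => !(y == x)) (PySem.Set.ofList xs))
        rw [List.filter_filter]
        apply List.filter_congr
        intro y _
        by_cases hyx : y = x
        · subst hyx; simp [hx]
        · simp [hyx]

lemma pv_nodup_count_one (l : List String) :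
    (l.filter (fun x => l.count x == 1)).Nodup := by
  rw [List.nodup_iff_count]
  intro a
  by_cases h : l.count a = 1
  · have := List.count_filter (p := fun x => l.count x == 1) (a := a) (l := l) (by simp [h])
    omega
  · have : a ∉ l.filter (fun x => l.count x == 1) := by
      intro hmem
      have := List.of_mem_filter hmem
      simp at this
      exact h this
    rw [List.count_eq_zero.mpr this]
    omega

lemma pv_filter_singleton (F : List (String × String)) (q : String × String) (hq : q ∈ F)
    (h1 : (F.map Prod.fst).count q.1 = 1) : F.filter (fun r => r.1 == q.1) = [q] := by
  have hlen : (F.filter (fun r => r.1 == q.1)).length = 1 := by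
    rw [← List.countP_eq_length_filter, ← pv_count_map_fst, h1]
  obtain ⟨a, ha⟩ := List.length_eq_one_iff.mp hlen
  have hqm : q ∈ F.filter (fun r => r.1 == q.1) := List.mem_filter.mpr ⟨hq, by simp⟩
  rw [ha] at hqm ⊢
  simp at hqm
  rw [hqm]

lemma pv_A_char (groups : List (String × String)) (department_names : List String) :
    index_groups_by_display_name_py groups department_names = pvCanon (pvSw groups department_names) := by
  unfold index_groups_by_display_name_py
  set F := pvSw groups department_names with hF
  -- Step 1: the index dict is a modify-fold over F
  have hidx : groups.foldl
      (fun d p => if p.2 ∈ department_names then d.modify p.2 [] (· ++ [p.1]) else d)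
      PySem.Dict.empty
      = F.foldl (fun d q => d.modify q.1 [] (· ++ [q.2])) PySem.Dict.empty := by
    rw [PySem.List.foldl_ite_eq_foldl_filter (p := fun p : String × String => p.2 ∈ department_names)]
    rw [hF]; unfold pvSw
    rw [List.foldl_map]
  rw [hidx]
  set idx := F.foldl (fun d q => d.modify q.1 [] (· ++ [q.2])) PySem.Dict.empty with hidxd
  have hkeys : idx.keys = PySem.Set.ofList (F.map Prod.fst) := by
    rw [hidxd, PySem.Dict.keys_foldl_modify_key F Prod.fst [] (fun _ q => (· ++ [q.2])),
        PySem.Dict.keys_empty, PySem.Set.update_nil_left]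
  have hnd : idx.keys.Nodup := by
    rw [hkeys]; exact PySem.Set.nodup_ofList _
  have hgetD : ∀ n, idx.getD n [] = pvG F n := by
    intro n
    rw [hidxd, PySem.Dict.getD_foldl_modify_append F PySem.Dict.empty n]
    simp [pvG, PySem.Dict.getD_empty]
  have hitems : idx.items = (PySem.Set.ofList (F.map Prod.fst)).map (fun n => (n, pvG F n)) := by
    rw [PySem.Dict.items_eq_map_keys idx hnd [], hkeys]
    exact List.map_congr_left (fun n _ => by rw [hgetD])
  show ((idx.items.foldl (fun u r => if r.2.length == 1 then u.insert r.1 r.2.headI else u)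
          PySem.Dict.empty).items,
        (idx.items.foldl (fun d r => if 1 < r.2.length then d.insert r.1 r.2 else d)
          PySem.Dict.empty).items) = pvCanon F
  rw [hitems, Prod.mk.injEq]
  set K := PySem.Set.ofList (F.map Prod.fst) with hK
  have hKnd : K.Nodup := PySem.Set.nodup_ofList _
  constructor
  · -- unique component
    rw [PySem.List.foldl_if_eq_foldl_filter (p := fun r : String × List String => r.2.length == 1),
        List.filter_map, List.foldl_map,
        PySem.Dict.items_foldl_insert_fresh _ (fun n => n) (fun n => (pvG F n).headI)
          PySem.Dict.empty (fun a _ => PySem.Dict.contains_empty a)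
          (by simpa using hKnd.filter _)]
    show List.map (fun n => (n, (pvG F n).headI)) _ = (pvCanon F).1
    unfold pvCanon
    rw [← hK]
    congr 1
    apply List.filter_congr
    intro n _
    show ((pvG F n).length == 1) = ((F.map Prod.fst).count n == 1)
    rw [pv_length_g]
  · -- duplicates component
    rw [PySem.List.foldl_ite_eq_foldl_filter (p := fun r : String × List String => 1 < r.2.length),
        List.filter_map, List.foldl_map,
        PySem.Dict.items_foldl_insert_fresh _ (fun n => n) (fun n => pvG F n)
          PySem.Dict.empty (fun a _ => PySem.Dict.contains_empty a)
          (by simpa using hKnd.filter _)]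
    show List.map (fun n => (n, pvG F n)) _ = (pvCanon F).2
    unfold pvCanon
    rw [← hK]
    congr 1
    apply List.filter_congr
    intro n _
    show (decide (1 < (pvG F n).length)) = (decide (1 < (F.map Prod.fst).count n))
    rw [pv_length_g]

lemma pv_B_char (groups : List (String × String)) (department_names : List String) :
    index_groups_by_display_name_py_alt groups department_names = pvCanon (pvSw groups department_names) := by
  unfold index_groups_by_display_name_py_alt
  set F := pvSw groups department_names with hF
  have hnames : (groups.map (·.2)).filter (fun n => decide (n ∈ department_names))
      = F.map Prod.fst := by
    rw [hF]; unfold pvSw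
    rw [List.filter_map, List.map_map]
    rfl
  set names := F.map Prod.fst with hN
  suffices h : ((groups.foldl (fun st p =>
      match (PySem.Dict.counter ((groups.map (·.2)).filter (fun n => decide (n ∈ department_names)))).get? p.2 with
      | none => st
      | some c =>
          if c == 1 then (st.1.insert p.2 p.1, st.2)
          else (st.1, st.2.insert p.2 (st.2.getD p.2 [] ++ [p.1])))
      ((PySem.Dict.empty : PySem.Dict String String), (PySem.Dict.empty : PySem.Dict String (List String)))).1.items,
      (groups.foldl (fun st p =>
      match (PySem.Dict.counter ((groups.map (·.2)).filter (fun n => decide (n ∈ department_names)))).get? p.2 with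
      | none => st
      | some c =>
          if c == 1 then (st.1.insert p.2 p.1, st.2)
          else (st.1, st.2.insert p.2 (st.2.getD p.2 [] ++ [p.1])))
      ((PySem.Dict.empty : PySem.Dict String String), (PySem.Dict.empty : PySem.Dict String (List String)))).2.items)
      = pvCanon F by exact h
  -- the main fold is a product of two independent folds over the full group list
  have hstep : groups.foldl (fun st p =>
      match (PySem.Dict.counter ((groups.map (·.2)).filter (fun n => decide (n ∈ department_names)))).get? p.2 with
      | none => st
      | some c =>
          if c == 1 then (st.1.insert p.2 p.1, st.2)
          else (st.1, st.2.insert p.2 (st.2.getD p.2 [] ++ [p.1])))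
      ((PySem.Dict.empty : PySem.Dict String String), (PySem.Dict.empty : PySem.Dict String (List String)))
      = groups.foldl (fun st p =>
          ((fun (u : PySem.Dict String String) (p : String × String) =>
              if p.2 ∈ department_names then
                (if names.count p.2 == 1 then u.insert p.2 p.1 else u) else u) st.1 p,
           (fun (d : PySem.Dict String (List String)) (p : String × String) =>
              if p.2 ∈ department_names then
                (if names.count p.2 == 1 then d else d.insert p.2 (d.getD p.2 [] ++ [p.1])) else d) st.2 p))
      ((PySem.Dict.empty : PySem.Dict String String), (PySem.Dict.empty : PySem.Dict String (List String))) := by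
    apply PySem.List.foldl_congr_mem'
    intro p hp st
    rw [hnames, pv_counter_get?]
    have hmem : p.2 ∈ names ↔ p.2 ∈ department_names := by
      rw [← hnames, List.mem_filter]
      simp only [decide_eq_true_eq, and_iff_right_iff_imp]
      intro _
      exact List.mem_map_of_mem hp
    by_cases hd : p.2 ∈ department_names
    · rw [if_pos (hmem.mpr hd)]
      by_cases hc : names.count p.2 = 1
      · simp [hc, hd]
      · simp [hc, hd]
    · rw [if_neg (fun h => hd (hmem.mp h))]
      simp [hd]
  rw [hstep, PySem.List.foldl_prod_mk
    (f := fun (u : PySem.Dict String String) (p : String × String) =>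
      if p.2 ∈ department_names then
        (if names.count p.2 == 1 then u.insert p.2 p.1 else u) else u)
    (g := fun (d : PySem.Dict String (List String)) (p : String × String) =>
      if p.2 ∈ department_names then
        (if names.count p.2 == 1 then d else d.insert p.2 (d.getD p.2 [] ++ [p.1])) else d)]
  rw [Prod.mk.injEq]
  constructor
  · -- unique component: one filtered insert-pass
    have hu : (groups.filter (fun p => decide (p.2 ∈ department_names))).foldl
        (fun (u : PySem.Dict String String) p => if names.count p.2 == 1 then u.insert p.2 p.1 else u)
        PySem.Dict.empty
        = F.foldl (fun u q => if names.count q.1 == 1 then u.insert q.1 q.2 else u)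
            PySem.Dict.empty := by
      rw [hF]; unfold pvSw; rw [List.foldl_map]
    rw [PySem.List.foldl_ite_eq_foldl_filter (p := fun p : String × String => p.2 ∈ department_names), hu,
        PySem.List.foldl_if_eq_foldl_filter (p := fun q : String × String => names.count q.1 == 1)]
    have key : (F.filter (fun q => names.count q.1 == 1)).map Prod.fst
        = names.filter (fun n => names.count n == 1) := by
      rw [hN, List.filter_map]
      rfl
    have hnd1 : ((F.filter (fun q => names.count q.1 == 1)).map Prod.fst).Nodup := by
      rw [key]; exact pv_nodup_count_one names
    rw [PySem.Dict.items_foldl_insert_fresh _ Prod.fst Prod.snd PySem.Dict.empty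
        (fun a _ => PySem.Dict.contains_empty _) hnd1]
    have hKf : (PySem.Set.ofList names).filter (fun n => names.count n == 1)
        = (F.filter (fun q => names.count q.1 == 1)).map Prod.fst := by
      rw [← pv_ofList_filter, ← key]
      exact PySem.Set.ofList_eq_self_of_nodup _ hnd1
    show List.map (fun q => (q.1, q.2)) (F.filter (fun q => names.count q.1 == 1)) = (pvCanon F).1
    unfold pvCanon
    rw [← hN, hKf, List.map_map]
    apply List.map_congr_left
    intro q hq
    have hqF : q ∈ F := List.mem_of_mem_filter hq
    have hc : names.count q.1 = 1 := by
      have := List.of_mem_filter hq; simpa using this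
    show (q.1, q.2) = (q.1, (pvG F q.1).headI)
    rw [pvG, pv_filter_singleton F q hqF (by rw [← hN]; exact hc)]
    rfl
  · -- duplicates component: one filtered modify-pass
    have hd0 : (groups.filter (fun p => decide (p.2 ∈ department_names))).foldl
        (fun (d : PySem.Dict String (List String)) p =>
          if names.count p.2 == 1 then d else d.insert p.2 (d.getD p.2 [] ++ [p.1]))
        PySem.Dict.empty
        = F.foldl (fun d q =>
            if names.count q.1 == 1 then d else d.insert q.1 (d.getD q.1 [] ++ [q.2]))
            PySem.Dict.empty := by
      rw [hF]; unfold pvSw; rw [List.foldl_map]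
    rw [PySem.List.foldl_ite_eq_foldl_filter (p := fun p : String × String => p.2 ∈ department_names)
        (f := fun (d : PySem.Dict String (List String)) (p : String × String) =>
          if names.count p.2 == 1 then d else d.insert p.2 (d.getD p.2 [] ++ [p.1])), hd0]
    have hflip : F.foldl (fun d q =>
          if names.count q.1 == 1 then d else d.insert q.1 (d.getD q.1 [] ++ [q.2]))
          PySem.Dict.empty
        = F.foldl (fun d q =>
            if !(names.count q.1 == 1) then d.modify q.1 [] (· ++ [q.2]) else d)
            PySem.Dict.empty := by
      apply PySem.List.foldl_congr_mem'
      intro q _ d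
      by_cases h : names.count q.1 == 1
      · simp [h]
      · simp only [h, Bool.not_false, if_true]
        rfl
    rw [hflip,
        PySem.List.foldl_if_eq_foldl_filter (p := fun q : String × String => !(names.count q.1 == 1))]
    set F2 := F.filter (fun q => !(names.count q.1 == 1)) with hF2
    set dd := F2.foldl (fun d q => d.modify q.1 [] (· ++ [q.2])) PySem.Dict.empty with hdd
    have hkeys2 : dd.keys = PySem.Set.ofList (F2.map Prod.fst) := by
      rw [hdd, PySem.Dict.keys_foldl_modify_key F2 Prod.fst [] (fun _ q => (· ++ [q.2])),
          PySem.Dict.keys_empty, PySem.Set.update_nil_left]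
    have hnd2 : dd.keys.Nodup := by rw [hkeys2]; exact PySem.Set.nodup_ofList _
    have hgetD2 : ∀ n, dd.getD n [] = pvG F2 n := by
      intro n
      rw [hdd, PySem.Dict.getD_foldl_modify_append F2 PySem.Dict.empty n]
      simp [pvG, PySem.Dict.getD_empty]
    have hitems2 : dd.items = (PySem.Set.ofList (F2.map Prod.fst)).map (fun n => (n, pvG F2 n)) := by
      rw [PySem.Dict.items_eq_map_keys dd hnd2 [], hkeys2]
      exact List.map_congr_left (fun n _ => by rw [hgetD2])
    rw [hitems2]
    have key2 : F2.map Prod.fst = names.filter (fun n => !(names.count n == 1)) := by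
      rw [hF2, hN, List.filter_map]
      rfl
    have hK3 : PySem.Set.ofList (F2.map Prod.fst)
        = (PySem.Set.ofList names).filter (fun n => decide (1 < names.count n)) := by
      rw [key2, pv_ofList_filter]
      apply List.filter_congr
      intro n hn
      have hpos : 0 < names.count n :=
        List.count_pos_iff.mpr ((PySem.Set.mem_ofList _ _).mp hn)
      by_cases h1 : names.count n = 1
      · simp [h1]
      · have h2 : 1 < names.count n := by omega
        simp [h1, h2]
    rw [hK3]
    show _ = (pvCanon F).2
    unfold pvCanon
    rw [← hN]
    apply List.map_congr_left
    intro n hn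
    have hc1 : ¬ names.count n = 1 := by
      have := List.of_mem_filter hn
      simp only [decide_eq_true_eq] at this
      omega
    have hGG : pvG F2 n = pvG F n := by
      rw [pvG, pvG, hF2, List.filter_filter]
      congr 1
      apply List.filter_congr
      intro r _
      by_cases hr : r.1 = n
      · simp [hr, hc1]
      · simp [hr]
    rw [hGG]


-- ===== VERDICT (by name: the statement is the Claim_ definition above) =====
theorem index_groups_by_display_name_py_spec : Claim_equal_index_groups_by_display_name_py := by
  intro groups department_names _
  unfold Spec_index_groups_by_display_name_py
  rw [pv_A_char, pv_B_char]
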